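-- pv_equiv track=rewrite | github.com/Patxi91/CodeWars_Cloud | 5kyu-Airport Arrivals Departures-1-Patxi.py | flap_display
-- ===== SOURCE A (Python) =====
-- def flap_display(lines, rotors):
--     ALPHABET = "ABCDEFGHIJKLMNOPQRSTUVWXYZ ?!@#&()|<>.:=-+*/0123456789"
--     result = []
--
--     for i in range(len(lines)):
--         line = lines[i]
--         rotor = rotors[i]
--         new_line = ""
--         shift = 0
--
--         for j in range(len(line)):
--             index = ALPHABET.index(line[j])
--             shift += rotor[j]
--             new_index = (index + shift) % len(ALPHABET)
--             new_line += ALPHABET[new_index]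
--
--         result.append(new_line)
--
--     return result
-- ===== SOURCE B (Python) =====
-- def flap_display(lines, rotors):
--     ALPHABET = "ABCDEFGHIJKLMNOPQRSTUVWXYZ ?!@#&()|<>.:=-+*/0123456789"
--     POS = {c: i for i, c in enumerate(ALPHABET)}  # hash index: no ALPHABET.index scan
--     out = []
--     for line, rotor in zip(lines, rotors):
--         shifts = rotor[:len(line)]
--         shift = sum(shifts)  # total rotation of the LAST character
--         rev = []
--         # decode back-to-front: the shift of char j is total minus the suffix sum after j
--         for c, r in zip(reversed(line), reversed(shifts)):
--             rev.append(ALPHABET[(POS[c] + shift) % len(ALPHABET)])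
--             shift -= r
--         out.append("".join(reversed(rev)))
--     return out
-- ===== Notes on version B (the rewrite author's own statement) =====
-- stated objective: alternative
-- what changed: B precomputes a char-to-index dictionary (removing the inner ALPHABET.index scan) and decodes each line back-to-front: it starts from the total rotor sum and subtracts suffix shifts while building the string reversed, instead of A's forward running-sum accumulator.
import Mathlib
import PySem

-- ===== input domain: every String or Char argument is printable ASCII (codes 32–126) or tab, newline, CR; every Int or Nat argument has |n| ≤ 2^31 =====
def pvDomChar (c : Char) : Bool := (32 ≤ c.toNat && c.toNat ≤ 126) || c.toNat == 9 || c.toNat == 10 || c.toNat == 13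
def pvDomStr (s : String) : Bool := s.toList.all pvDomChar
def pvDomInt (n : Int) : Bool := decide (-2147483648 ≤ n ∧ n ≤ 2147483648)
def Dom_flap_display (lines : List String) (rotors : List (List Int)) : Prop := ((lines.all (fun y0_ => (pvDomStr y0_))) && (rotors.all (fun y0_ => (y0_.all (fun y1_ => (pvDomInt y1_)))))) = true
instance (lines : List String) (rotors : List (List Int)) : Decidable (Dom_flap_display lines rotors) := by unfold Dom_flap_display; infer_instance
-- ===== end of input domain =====

-- B decodes each line BACK-TO-FRONT from the rotor's total sum, subtracting suffix shifts, with a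
-- precomputed char→index dictionary replacing the inner ALPHABET.index scan (alternative decomposition).

-- the flap alphabet, shared constant of both programs
def flapAlph : List Char := "ABCDEFGHIJKLMNOPQRSTUVWXYZ ?!@#&()|<>.:=-+*/0123456789".toList

-- ===== PORT A =====
def flap_display (lines : List String) (rotors : List (List Int)) : List String :=
  (PySem.List.pyRange 0 (lines.length : Int) 1).foldl
    (fun result i =>
      let line := PySem.List.pyGetD lines i ""
      let rotor := PySem.List.pyGetD rotors i []
      let p :=
        (PySem.List.pyRange 0 (line.toList.length : Int) 1).foldl
          (fun (st : List Char × Int) j =>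
            let index : Int := ((PySem.List.index? flapAlph (PySem.List.pyGetD line.toList j ' ')).getD 0 : Nat)
            let shift := st.2 + PySem.List.pyGetD rotor j 0
            let new_index := PySem.Int.mod (index + shift) (flapAlph.length : Int)
            (st.1 ++ [PySem.List.pyGetD flapAlph new_index ' '], shift))
          ([], 0)
      result ++ [String.ofList p.1])
    []

-- ===== PORT B =====
-- POS = {c: i for i, c in enumerate(ALPHABET)}
def flapPos : PySem.Dict Char Int :=
  PySem.Dict.ofList (flapAlph.zipIdx.map (fun p => (p.1, (p.2 : Int))))

def flap_display_alt (lines : List String) (rotors : List (List Int)) : List String :=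
  (lines.zip rotors).foldl
    (fun out lr =>
      let shifts := PySem.List.slice lr.2 none (some (lr.1.toList.length : Int))
      let p :=
        (lr.1.toList.reverse.zip shifts.reverse).foldl
          (fun (st : List Char × Int) cr =>
            (st.1 ++ [PySem.List.pyGetD flapAlph
                (PySem.Int.mod ((PySem.Dict.get? flapPos cr.1).getD 0 + st.2)
                  (flapAlph.length : Int)) ' '],
             st.2 - cr.2))
          ([], shifts.sum)
      out ++ [String.ofList p.1.reverse])
    []

-- ===== PRECONDITION & SPEC =====
-- Pre_ excludes exactly the inputs where Python A raises: fewer rotors than lines or a rotor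
-- shorter than its line (IndexError), or a character outside ALPHABET (ValueError).
def Pre_flap_display (lines : List String) (rotors : List (List Int)) : Prop :=
  (decide (lines.length ≤ rotors.length) &&
   (lines.zip rotors).all (fun p =>
     decide (p.1.toList.length ≤ p.2.length) &&
     p.1.toList.all (fun c => decide (c ∈ flapAlph)))) = true
instance (lines : List String) (rotors : List (List Int)) : Decidable (Pre_flap_display lines rotors) := by unfold Pre_flap_display; infer_instance

def pvWitness_flap_display : List String × List (List Int) := (["AB"], [[1, 2]])

def Spec_flap_display (lines : List String) (rotors : List (List Int)) (out : List String) : Prop := out = flap_display_alt lines rotors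
instance (lines : List String) (rotors : List (List Int)) (out : List String) : Decidable (Spec_flap_display lines rotors out) := by unfold Spec_flap_display; infer_instance

-- ===== CLAIM (what is proved, stated in full; the proofs are below) =====
def Claim_equal_flap_display : Prop := ∀ (lines : List String) (rotors : List (List Int)), Dom_flap_display lines rotors → Pre_flap_display lines rotors → Spec_flap_display lines rotors (flap_display lines rotors)

-- ===== LEMMAS AND PROOFS =====

-- named copies (definitionally equal) of the two loop bodies, for the proofs
def encCharA (c : Char) (s : Int) : Char :=
  PySem.List.pyGetD flapAlph
    (PySem.Int.mod ((((PySem.List.index? flapAlph c).getD 0 : Nat) : Int) + s)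
      (flapAlph.length : Int)) ' '

def encCharB (c : Char) (s : Int) : Char :=
  PySem.List.pyGetD flapAlph
    (PySem.Int.mod ((PySem.Dict.get? flapPos c).getD 0 + s) (flapAlph.length : Int)) ' '

def stepA (cs : List Char) (rotor : List Int) (st : List Char × Int) (j : Int) : List Char × Int :=
  (st.1 ++ [encCharA (PySem.List.pyGetD cs j ' ') (st.2 + PySem.List.pyGetD rotor j 0)],
   st.2 + PySem.List.pyGetD rotor j 0)

def stepB (st : List Char × Int) (cr : Char × Int) : List Char × Int :=
  (st.1 ++ [encCharB cr.1 st.2], st.2 - cr.2)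

def valA (lines : List String) (rotors : List (List Int)) (i : Int) : String :=
  String.ofList (((PySem.List.pyRange 0 ((PySem.List.pyGetD lines i "").toList.length : Int) 1).foldl
      (stepA (PySem.List.pyGetD lines i "").toList (PySem.List.pyGetD rotors i [])) ([], 0)).1)

def valB (lr : String × List Int) : String :=
  String.ofList (((lr.1.toList.reverse.zip
      (PySem.List.slice lr.2 none (some (lr.1.toList.length : Int))).reverse).foldl stepB
      ([], (PySem.List.slice lr.2 none (some (lr.1.toList.length : Int))).sum)).1.reverse)

set_option maxRecDepth 10000 in
lemma encCharB_eq_encCharA (c : Char) (hc : c ∈ flapAlph) (s : Int) :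
    encCharB c s = encCharA c s := by
  have hall := List.all_eq_true.mp
    (by decide : flapAlph.all (fun c => decide ((PySem.Dict.get? flapPos c).getD 0 =
      (((PySem.List.index? flapAlph c).getD 0 : Nat) : Int))) = true)
  simp [encCharB, encCharA, of_decide_eq_true (hall c hc)]

lemma take_succ_sum (xs : List Int) (m : Nat) (h : m < xs.length) :
    (xs.take (m+1)).sum = (xs.take m).sum + xs.getD m 0 := by
  rw [List.take_add_one, List.sum_append, List.getElem?_eq_getElem h, List.getD_eq_getElem xs 0 h]
  simp

lemma innerA_spec (cs : List Char) (rotor : List Int) (m : Nat) (hm : m ≤ cs.length)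
    (hr : m ≤ rotor.length) (acc : List Char) (shift : Int) :
    (PySem.List.pyRange 0 (m : Int) 1).foldl (stepA cs rotor) (acc, shift) =
      (acc ++ (List.range m).map (fun k => encCharA (cs.getD k ' ') (shift + (rotor.take (k+1)).sum)),
       shift + (rotor.take m).sum) := by
  induction m with
  | zero => simp [PySem.List.pyRange_one_eq_nil]
  | succ n ih =>
    have hc : ((n+1 : Nat) : Int) = (n : Int) + 1 := by push_cast; ring
    rw [hc, PySem.List.pyRange_one_succ_right (by positivity), List.foldl_append,
        ih (by omega) (by omega)]
    simp only [List.foldl_cons, List.foldl_nil, stepA, PySem.List.pyGetD_natCast]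
    rw [List.range_succ, List.map_append]
    simp [add_assoc, take_succ_sum rotor n (show n < rotor.length by omega), List.getD]

-- the reverse pass: fold over (u, v) pairs, subtracting v's entries from the shift
lemma innerB_spec (u : List Char) (v : List Int) (h : u.length = v.length)
    (acc : List Char) (t : Int) :
    (u.zip v).foldl stepB (acc, t) =
      (acc ++ (List.range u.length).map (fun k => encCharB (u.getD k ' ') (t - (v.take k).sum)),
       t - v.sum) := by
  induction u generalizing v acc t with
  | nil =>
    cases v with
    | nil => simp
    | cons s v' => simp at h
  | cons c u' ih =>
    cases v with
    | nil => simp at h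
    | cons s v' =>
      simp only [List.zip_cons_cons, List.foldl_cons, stepB]
      rw [ih v' (by simpa using h)]
      simp [List.range_succ_eq_map, List.map_map, Function.comp, sub_sub]

-- ===== VERDICT =====
theorem flap_display_spec : Claim_equal_flap_display := by
  intro lines rotors _ hPre
  unfold Spec_flap_display
  unfold Pre_flap_display at hPre
  simp only [Bool.and_eq_true, List.all_eq_true, decide_eq_true_eq] at hPre
  obtain ⟨hlen, hpairs⟩ := hPre
  have hA : flap_display lines rotors =
      (PySem.List.pyRange 0 (lines.length : Int) 1).foldl (fun r i => r ++ [valA lines rotors i]) [] := rfl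
  have hB : flap_display_alt lines rotors =
      (lines.zip rotors).foldl (fun r p => r ++ [valB p]) [] := rfl
  rw [hA, hB, PySem.List.foldl_append_singleton_eq_map, PySem.List.foldl_append_singleton_eq_map,
      List.nil_append, List.nil_append]
  apply List.ext_getElem
  · simp [PySem.List.length_pyRange_one]; omega
  · intro k h1 h2
    simp only [List.getElem_map, PySem.List.getElem_pyRange_one, List.getElem_zip, zero_add]
    have hk : k < lines.length := by
      simp [PySem.List.length_pyRange_one] at h1; omega
    have hkr : k < rotors.length := by omega
    have hkz : k < (lines.zip rotors).length := by
      simp [List.length_zip]; omega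
    have hmem : (lines[k]'hk, rotors[k]'hkr) ∈ lines.zip rotors := by
      have := List.getElem_mem (l := lines.zip rotors) hkz
      simpa [List.getElem_zip] using this
    obtain ⟨hlr, hchars⟩ := hpairs _ hmem
    unfold valA valB
    have e1 : PySem.List.pyGetD lines (k : Int) "" = lines[k]'hk := by
      rw [PySem.List.pyGetD_natCast]; exact List.getD_eq_getElem lines "" hk
    have e2 : PySem.List.pyGetD rotors (k : Int) [] = rotors[k]'hkr := by
      rw [PySem.List.pyGetD_natCast]; exact List.getD_eq_getElem rotors [] hkr
    rw [e1, e2]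
    set cs := (lines[k]'hk).toList with hcs
    set rotor := rotors[k]'hkr with hrot
    have hlr' : cs.length ≤ rotor.length := hlr
    set ss := rotor.take cs.length with hss
    have hsl : PySem.List.slice rotor none (some (cs.length : Int)) = ss := by
      rw [PySem.List.slice_to_natCast]
    have hssl : ss.length = cs.length := by rw [hss, List.length_take]; omega
    rw [innerA_spec cs rotor cs.length le_rfl hlr' [] 0, hsl,
        innerB_spec cs.reverse ss.reverse (by simp [hssl]) [] ss.sum]
    simp only [List.nil_append]
    congr 1
    apply List.ext_getElem
    · simp
    · intro j hj1 hj2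
      have hjn : j < cs.length := by simpa using hj1
      have hrev : cs.length - 1 - j < cs.length := by omega
      simp only [List.getElem_reverse, List.getElem_map, List.getElem_range, List.length_map,
        List.length_range, List.length_reverse]
      -- index into the reversed B-map
      have hgetc : cs.reverse.getD (cs.length - 1 - j) ' ' = cs.getD j ' ' := by
        rw [List.getD_eq_getElem _ ' ' (by simp; omega), List.getElem_reverse,
            List.getD_eq_getElem _ ' ' (by omega)]
        congr 1; omega
      have hsum : (ss.reverse.take (cs.length - 1 - j)).sum = (ss.drop (j+1)).sum := by
        rw [List.take_reverse, List.sum_reverse, hssl]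
        congr 2; omega
      have hsplit : ss.sum - (ss.drop (j+1)).sum = (rotor.take (j+1)).sum := by
        have : (ss.take (j+1)).sum + (ss.drop (j+1)).sum = ss.sum := by
          rw [← List.sum_append, List.take_append_drop]
        have hts : ss.take (j+1) = rotor.take (j+1) := by
          rw [hss, List.take_take]; congr 1; omega
        rw [hts] at this
        omega
      have hc : cs.getD j ' ' ∈ flapAlph := by
        have hjm : cs.getD j ' ' ∈ cs := by
          rw [List.getD_eq_getElem _ ' ' (by omega)]
          exact List.getElem_mem _
        exact hchars _ hjm
      simp only [List.length_reverse] at *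
      rw [hgetc, hsum, hsplit, encCharB_eq_encCharA _ hc, zero_add]
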